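-- pv_equiv track=rewrite | github.com/andrew867/epassportviewer | pypassport-2.0/pypassport/attacks/bruteForce.py | _DESParity
-- ===== SOURCE A (Python) =====
-- def _DESParity(data):
--     """
--     @note: Code fragment from the pyPassport.doc9303.bac.BAC class
--     """
--     adjusted= ''
--     for x in range(len(data)):
--         y= ord(data[x]) & 0xfe
--         parity= 0
--         for z in range(8):
--             parity += y >>  z & 1
--         adjusted += chr(y + (not parity % 2))
--     return adjusted
-- ===== SOURCE B (Python) =====
-- def _DESParity(data):
--     """Odd-parity adjust: precompute a lookup table for the distinct
--     characters present, then translate the input in one pass."""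
--     table = {}
--     for c in set(data):
--         y = ord(c) & 0xfe
--         table[c] = chr(y | (1 - (bin(y).count('1') & 1)))
--     return ''.join(table[c] for c in data)
-- ===== Notes on version B (the rewrite author's own statement) =====
-- stated objective: faster
-- what changed: B builds a parity-adjustment lookup table once (a dict keyed on the distinct characters present, parity via a bin-string popcount) and then translates the input by a single join-over-lookups pass, instead of A's per-character 8-iteration bit-summing inner loop with quadratic string concatenation.
import Mathlib
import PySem

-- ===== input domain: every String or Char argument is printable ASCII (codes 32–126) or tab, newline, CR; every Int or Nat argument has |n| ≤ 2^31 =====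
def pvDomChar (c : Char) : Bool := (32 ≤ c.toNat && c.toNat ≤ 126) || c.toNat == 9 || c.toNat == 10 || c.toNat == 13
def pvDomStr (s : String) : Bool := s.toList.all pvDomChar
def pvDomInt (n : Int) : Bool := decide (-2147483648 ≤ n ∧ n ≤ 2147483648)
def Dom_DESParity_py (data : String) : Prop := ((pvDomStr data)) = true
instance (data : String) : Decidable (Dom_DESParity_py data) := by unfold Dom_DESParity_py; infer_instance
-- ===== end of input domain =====

-- B replaces A's per-character 8-step bit-summing loop with a lookup table built once
-- over the distinct characters present, then a single translation pass (idiomatic; same result).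

-- ===== PORT A =====
-- literal transliteration of A: index loop over range(len(data)), inner loop z in range(8)
-- summing bits, string grown by concatenation. getD is safe: x < length always.
def DESParity_py (data : String) : String :=
  String.mk <|
    (List.range data.toList.length).foldl
      (fun adjusted x =>
        let y := (data.toList.getD x ' ').toNat &&& 0xfe
        let parity := (List.range 8).foldl (fun p z => p + ((y >>> z) &&& 1)) 0
        adjusted ++ [Char.ofNat (y + (if parity % 2 = 0 then 1 else 0))])
      []

-- ===== PORT B =====
-- B-side helper: the table value chr(y | (1 - (bin(y).count('1') & 1))); bin(y).count('1')
-- is the number of 1-digits of y, ported as (Nat.digits 2 y).count 1.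
def pvAdj (c : Char) : Char :=
  let y := c.toNat &&& 0xfe
  Char.ofNat (y ||| (1 - ((Nat.digits 2 y).count 1 &&& 1)))

-- table built over set(data) (order-independent: value depends only on the key),
-- then one lookup pass. table[c] never misses (c ∈ set(data)), so getD's default is dead.
def DESParity_py_alt (data : String) : String :=
  let table : PySem.Dict Char Char :=
    (PySem.Set.ofList data.toList).foldl (fun d c => d.insert c (pvAdj c)) PySem.Dict.empty
  String.mk (data.toList.map (fun c => (table.get? c).getD c))

-- ===== PRECONDITION & SPEC =====
def Spec_DESParity_py (data : String) (out : String) : Prop := out = DESParity_py_alt data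
instance (data : String) (out : String) : Decidable (Spec_DESParity_py data out) := by unfold Spec_DESParity_py; infer_instance

-- ===== CLAIM (what is proved, stated in full; the proofs are below) =====
def Claim_equal_DESParity_py : Prop := ∀ (data : String), Dom_DESParity_py data → Spec_DESParity_py data (DESParity_py data)

-- ===== LEMMAS AND PROOFS =====

-- A's per-character transform, factored out of the fold body
def pvFA (c : Char) : Char :=
  let y := c.toNat &&& 0xfe
  let parity := (List.range 8).foldl (fun p z => p + ((y >>> z) &&& 1)) 0
  Char.ofNat (y + (if parity % 2 = 0 then 1 else 0))

lemma pvAdj_eq_fa_lt (n : Nat) (h : n < 128) : pvFA (Char.ofNat n) = pvAdj (Char.ofNat n) := by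
  revert n h; decide

lemma pvAdj_eq_fa (c : Char) (h : pvDomChar c = true) : pvFA c = pvAdj c := by
  have hlt : c.toNat < 128 := by
    simp only [pvDomChar, Bool.or_eq_true, Bool.and_eq_true, decide_eq_true_eq, beq_iff_eq] at h
    omega
  have := pvAdj_eq_fa_lt c.toNat hlt
  rwa [Char.ofNat_toNat] at this

lemma pvFoldA (l : List Char) (acc : List Char) :
    (List.range l.length).foldl (fun adjusted x => adjusted ++ [pvFA (l.getD x ' ')]) acc
      = acc ++ l.map pvFA := by
  induction l generalizing acc with
  | nil => simp
  | cons a t ih =>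
    simp only [List.length_cons, List.range_succ_eq_map, List.foldl_cons, List.foldl_map,
      List.getD_cons_zero, List.getD_cons_succ, List.map_cons]
    rw [ih]
    simp

lemma pvTable_get (ks : List Char) (d : PySem.Dict Char Char) (c : Char) :
    (ks.foldl (fun d c => d.insert c (pvAdj c)) d).get? c
      = if c ∈ ks then some (pvAdj c) else d.get? c := by
  induction ks generalizing d with
  | nil => simp
  | cons k t ih =>
    simp only [List.foldl_cons, ih, PySem.Dict.get?_insert, List.mem_cons]
    by_cases hck : c = k
    · subst hck; simp
    · simp [hck]

-- ===== VERDICT (by name: the statement is the Claim_ definition above) =====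
theorem DESParity_py_spec : Claim_equal_DESParity_py := by
  intro data hdom
  unfold Spec_DESParity_py DESParity_py DESParity_py_alt
  have hmem : ∀ c ∈ data.toList, pvDomChar c = true := by
    simpa [Dom_DESParity_py, pvDomStr, List.all_eq_true] using hdom
  have hA : (List.range data.toList.length).foldl
      (fun adjusted x =>
        let y := (data.toList.getD x ' ').toNat &&& 0xfe
        let parity := (List.range 8).foldl (fun p z => p + ((y >>> z) &&& 1)) 0
        adjusted ++ [Char.ofNat (y + (if parity % 2 = 0 then 1 else 0))]) []
      = data.toList.map pvFA := by
    simpa [pvFA] using pvFoldA data.toList []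
  rw [hA]
  congr 1
  apply List.map_congr_left
  intro c hc
  rw [pvTable_get]
  have : c ∈ PySem.Set.ofList data.toList := by
    rw [PySem.Set.mem_ofList]; exact hc
  simp [this, pvAdj_eq_fa c (hmem c hc)]
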